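-- pv_equiv track=rewrite | github.com/Melkye/Labs | DecisionTheory/practice_3/app/practice_3.py | get_majoritar_relation
-- ===== SOURCE A (Python) =====
-- def get_sigma(x, y):
--     sigma = []
--     for i in range(len(x)):
--         delta_i = x[i] - y[i]
--         if delta_i > 0:
--             sigma.append(1)
--         elif delta_i < 0:
--             sigma.append(-1)
--         else:
--             sigma.append(0)
--     return sigma
--
-- def get_sigma_matrix(alternatives_ratings_by_criteria):
--     sigma_matrix = []
--
--     # num of rows = num of alternatives
--     for x in range(len(alternatives_ratings_by_criteria)):
--         sigma_matrix.append([])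
--         for y in range(len(alternatives_ratings_by_criteria)):
--             sigma = get_sigma(
--                 alternatives_ratings_by_criteria[x], alternatives_ratings_by_criteria[y])
--             sigma_matrix[x].append(sigma)
--
--     return sigma_matrix
--
-- def get_majoritar_relation(alternatives_ratings_by_criteria):
--     sigma_matrix = get_sigma_matrix(alternatives_ratings_by_criteria)
--
--     majoritar_relation = []
--     for x in range(len(alternatives_ratings_by_criteria)):
--         majoritar_relation.append([])
--
--         for y in range(len(alternatives_ratings_by_criteria)):
--             sum_sigma = 0
--             for i in range(len(sigma_matrix[x][y])):
--                 sum_sigma += sigma_matrix[x][y][i]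
--
--             if sum_sigma > 0:
--                 majoritar_relation[x].append(1)
--             else:
--                 majoritar_relation[x].append(0)
--
--     return majoritar_relation
-- ===== SOURCE B (Python) =====
-- def get_majoritar_relation(alternatives_ratings_by_criteria):
--     alts = alternatives_ratings_by_criteria
--     n = len(alts)
--     # criterion-major accumulation: transpose to columns, fold each column's
--     # antisymmetric comparison matrix into a running n x n sum matrix, threshold once
--     sums = [[0] * n for _ in range(n)]
--     for col in zip(*alts):
--         sums = [[s + (a > b) - (a < b) for s, b in zip(row, col)]
--                 for row, a in zip(sums, col)]
--     return [[1 if s > 0 else 0 for s in row] for row in sums]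
-- ===== Notes on version B (the rewrite author's own statement) =====
-- stated objective: alternative
-- what changed: B inverts the traversal: instead of A's pair-major two-phase build of an n x n table of per-pair sign lists followed by a rescan summing each, B transposes the input to criterion-major columns via zip(*alts) and folds each column's comparison contributions into a running n x n integer sum matrix, thresholding once at the end.
import Mathlib
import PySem

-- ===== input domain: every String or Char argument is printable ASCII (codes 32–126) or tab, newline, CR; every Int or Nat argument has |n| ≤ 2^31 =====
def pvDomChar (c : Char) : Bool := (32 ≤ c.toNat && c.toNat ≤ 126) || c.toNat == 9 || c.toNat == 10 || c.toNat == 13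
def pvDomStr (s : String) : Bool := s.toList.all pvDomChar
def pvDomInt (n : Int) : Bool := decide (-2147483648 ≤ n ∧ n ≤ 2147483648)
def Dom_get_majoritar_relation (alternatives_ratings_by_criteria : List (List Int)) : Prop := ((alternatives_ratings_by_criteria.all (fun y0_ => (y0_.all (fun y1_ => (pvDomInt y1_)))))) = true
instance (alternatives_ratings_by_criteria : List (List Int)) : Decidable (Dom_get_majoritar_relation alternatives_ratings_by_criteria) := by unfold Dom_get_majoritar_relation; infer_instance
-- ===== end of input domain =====

-- B replaces A's pair-major sign table + rescan by a criterion-major fold: transpose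
-- to columns, accumulate each column's comparisons into an n×n sum matrix, threshold
-- once (objective: alternative).

-- ===== PORT A =====
-- get_sigma(x, y): per-index sign of x[i] - y[i].  pyGetD is total with default 0;
-- inside Pre_ (equal row lengths) every index is in range, matching Python exactly.
def pvGetSigma (x y : List Int) : List Int :=
  (PySem.List.pyRange 0 (x.length : Int) 1).map (fun i =>
    let delta_i := PySem.List.pyGetD x i 0 - PySem.List.pyGetD y i 0
    if delta_i > 0 then (1 : Int) else if delta_i < 0 then -1 else 0)

-- get_sigma_matrix: the full n × n table of sign lists, built by index loops.
def pvSigmaMatrix (rows : List (List Int)) : List (List (List Int)) :=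
  (PySem.List.pyRange 0 (rows.length : Int) 1).map (fun x =>
    (PySem.List.pyRange 0 (rows.length : Int) 1).map (fun y =>
      pvGetSigma (PySem.List.pyGetD rows x []) (PySem.List.pyGetD rows y [])))

def get_majoritar_relation (alternatives_ratings_by_criteria : List (List Int)) : List (List Int) :=
  let sigma_matrix := pvSigmaMatrix alternatives_ratings_by_criteria
  (PySem.List.pyRange 0 (alternatives_ratings_by_criteria.length : Int) 1).map (fun x =>
    (PySem.List.pyRange 0 (alternatives_ratings_by_criteria.length : Int) 1).map (fun y =>
      let s := PySem.List.pyGetD (PySem.List.pyGetD sigma_matrix x []) y []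
      let sum_sigma := (PySem.List.pyRange 0 (s.length : Int) 1).foldl
        (fun acc i => acc + PySem.List.pyGetD s i 0) 0
      if sum_sigma > 0 then (1 : Int) else 0))

-- ===== PORT B =====
-- zip(*rows): columns, truncating to the shortest row (empty when rows == []).
-- Structural recursion on a fuel equal to the first row's length: the loop stops
-- either when some row is exhausted or when the first row (the fuel) runs out,
-- which is exactly Python's zip truncation rule.
def pvZipStarGo : Nat → List (List Int) → List (List Int)
  | 0, _ => []
  | fuel + 1, rows =>
    if rows.isEmpty then []
    else if rows.any (·.isEmpty) then []
    else (rows.map (fun r => r.headD 0)) :: pvZipStarGo fuel (rows.map (·.tail))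

def pvZipStar (rows : List (List Int)) : List (List Int) :=
  pvZipStarGo ((rows.headD []).length) rows

-- (a > b) - (a < b) of Source B
def pvSgn (a b : Int) : Int := (if a > b then 1 else 0) - (if a < b then 1 else 0)

def get_majoritar_relation_alt (alternatives_ratings_by_criteria : List (List Int)) : List (List Int) :=
  let n := alternatives_ratings_by_criteria.length
  let sums := (pvZipStar alternatives_ratings_by_criteria).foldl
    (fun sums col =>
      (sums.zip col).map (fun rc =>
        (rc.1.zip col).map (fun sb => sb.1 + pvSgn rc.2 sb.2)))
    (List.replicate n (List.replicate n (0 : Int)))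
  sums.map (fun row => row.map (fun s => if s > 0 then (1 : Int) else 0))

-- ===== PRECONDITION & SPEC =====
-- Pre_ excludes ragged inputs (rows of unequal length): there A raises IndexError
-- inside get_sigma, so it returns no value.
def Pre_get_majoritar_relation (alternatives_ratings_by_criteria : List (List Int)) : Prop :=
  ∀ r ∈ alternatives_ratings_by_criteria,
    r.length = (alternatives_ratings_by_criteria.headD []).length

instance (alternatives_ratings_by_criteria : List (List Int)) : Decidable (Pre_get_majoritar_relation alternatives_ratings_by_criteria) := by unfold Pre_get_majoritar_relation; infer_instance

def pvWitness_get_majoritar_relation : List (List Int) := [[3, 1, 2], [2, 2, 2], [1, 3, 1]]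

def Spec_get_majoritar_relation (alternatives_ratings_by_criteria : List (List Int)) (out : List (List Int)) : Prop := out = get_majoritar_relation_alt alternatives_ratings_by_criteria
instance (alternatives_ratings_by_criteria : List (List Int)) (out : List (List Int)) : Decidable (Spec_get_majoritar_relation alternatives_ratings_by_criteria out) := by unfold Spec_get_majoritar_relation; infer_instance

-- ===== CLAIM (what is proved, stated in full; the proofs are below) =====
def Claim_equal_get_majoritar_relation : Prop := ∀ (alternatives_ratings_by_criteria : List (List Int)), Dom_get_majoritar_relation alternatives_ratings_by_criteria → Pre_get_majoritar_relation alternatives_ratings_by_criteria → Spec_get_majoritar_relation alternatives_ratings_by_criteria (get_majoritar_relation alternatives_ratings_by_criteria)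


-- ===== LEMMAS AND PROOFS =====

-- index loop over a list = map over the list
theorem map_range_get {α β : Type} (l : List α) (d : α) (f : α → β) :
    (PySem.List.pyRange 0 (l.length : Int) 1).map (fun i => f (PySem.List.pyGetD l i d)) = l.map f := by
  rw [show (fun i => f (PySem.List.pyGetD l i d)) = f ∘ (fun i => PySem.List.pyGetD l i d) from rfl,
    ← List.map_map, PySem.List.map_pyGetD_pyRange_zero']

-- same, when the indexed list is l.map g but the bound is written as l.length
theorem map_range_get_map {α β γ : Type} (l : List α) (g : α → β) (d : β) (f : β → γ) :
    (PySem.List.pyRange 0 (l.length : Int) 1).map (fun i => f (PySem.List.pyGetD (l.map g) i d))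
      = l.map (fun x => f (g x)) := by
  rw [show (l.length : Int) = ((l.map g).length : Int) by simp, map_range_get (l.map g) d f,
    List.map_map]
  rfl

theorem sigma_matrix_eq (rows : List (List Int)) :
    pvSigmaMatrix rows = rows.map (fun x => rows.map (fun y => pvGetSigma x y)) := by
  unfold pvSigmaMatrix
  rw [map_range_get rows [] (fun xr =>
    (PySem.List.pyRange 0 (rows.length : Int) 1).map (fun y =>
      pvGetSigma xr (PySem.List.pyGetD rows y [])))]
  exact List.map_congr_left (fun x _ => map_range_get rows [] (pvGetSigma x))

theorem sum_fold_eq (s : List Int) :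
    (PySem.List.pyRange 0 (s.length : Int) 1).foldl
      (fun acc i => acc + PySem.List.pyGetD s i 0) 0 = s.sum := by
  rw [PySem.List.foldl_pyRange_zero_pyGetD' s 0 (fun acc v => acc + v) 0]
  exact Eq.symm List.sum_eq_foldl

-- sigma's sum as a sum over criterion indices
theorem sigma_sum_eq (x y : List Int) (m : Nat) (hx : x.length = m) (_hy : y.length = m) :
    (pvGetSigma x y).sum
      = ((List.range m).map (fun j => pvSgn (x.getD j 0) (y.getD j 0))).sum := by
  congr 1
  apply List.ext_getElem
  · simp [pvGetSigma, hx]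
  · intro j h1 h2
    have hj : j < m := by simpa [pvGetSigma, hx] using h1
    simp only [pvGetSigma, List.getElem_map, PySem.List.getElem_pyRange_one, zero_add,
      List.getElem_range]
    rw [PySem.List.pyGetD_natCast, PySem.List.pyGetD_natCast]
    simp only [pvSgn]
    split_ifs <;> omega

-- columns produced by pvZipStar when all rows have length m
theorem zipStarGo_eq (m : Nat) (rows : List (List Int)) (hne : rows ≠ [])
    (hlen : ∀ r ∈ rows, r.length = m) :
    pvZipStarGo m rows = (List.range m).map (fun j => rows.map (fun r => r.getD j 0)) := by
  induction m generalizing rows with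
  | zero => simp [pvZipStarGo]
  | succ m ih =>
    rw [pvZipStarGo, if_neg (by simpa [List.isEmpty_iff] using hne)]
    have hnone : (rows.any (·.isEmpty)) = false := by
      simp only [List.any_eq_false]
      intro a ha
      have := hlen a ha
      intro h2
      rw [List.isEmpty_iff.mp h2] at this
      simp at this
    rw [if_neg (by simp [hnone])]
    have htail : ∀ s ∈ rows.map (·.tail), s.length = m := by
      intro s hs
      obtain ⟨a, ha, rfl⟩ := List.mem_map.mp hs
      have := hlen a ha
      simp [List.length_tail, this]
    rw [ih (rows.map (·.tail)) (by simpa using hne) htail]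
    rw [List.range_succ_eq_map]
    simp only [List.map_cons, List.map_map]
    congr 1
    · apply List.map_congr_left
      intro a ha
      have := hlen a ha
      obtain ⟨b, bs, rfl⟩ := List.exists_cons_of_ne_nil
        (by intro h; rw [h] at this; simp at this : a ≠ [])
      simp
    · apply List.map_congr_left
      intro j _
      simp only [Function.comp]
      apply List.map_congr_left
      intro a ha
      have := hlen a ha
      obtain ⟨b, bs, rfl⟩ := List.exists_cons_of_ne_nil
        (by intro h; rw [h] at this; simp at this : a ≠ [])
      simp

theorem zipStar_eq (m : Nat) (rows : List (List Int)) (hne : rows ≠ [])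
    (hlen : ∀ r ∈ rows, r.length = m) :
    pvZipStar rows = (List.range m).map (fun j => rows.map (fun r => r.getD j 0)) := by
  unfold pvZipStar
  rw [show (rows.headD []).length = m from
    hlen _ (by obtain ⟨r, t, rfl⟩ := List.exists_cons_of_ne_nil hne; simp)]
  exact zipStarGo_eq m rows hne hlen

-- one accumulation step on a matrix indexed by rows
theorem step_eq (rows : List (List Int)) (F : List Int → List Int → Int) (g : List Int → Int) :
    ((((rows.map (fun x => rows.map (F x))).zip (rows.map g)).map (fun rc =>
        (rc.1.zip (rows.map g)).map (fun sb => sb.1 + pvSgn rc.2 sb.2))))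
      = rows.map (fun x => rows.map (fun y => F x y + pvSgn (g x) (g y))) := by
  rw [List.zip_map']
  rw [List.map_map]
  apply List.map_congr_left
  intro x _
  simp only [Function.comp]
  rw [List.zip_map']
  rw [List.map_map]
  rfl

-- fold over criterion-columns accumulates the per-pair sign sums
theorem fold_cols (rows : List (List Int)) (js : List Nat) (F : List Int → List Int → Int) :
    (js.map (fun j => rows.map (fun r => r.getD j 0))).foldl
      (fun sums col =>
        (sums.zip col).map (fun rc =>
          (rc.1.zip col).map (fun sb => sb.1 + pvSgn rc.2 sb.2)))
      (rows.map (fun x => rows.map (F x)))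
    = rows.map (fun x => rows.map (fun y =>
        F x y + ((js.map (fun j => pvSgn (x.getD j 0) (y.getD j 0))).sum))) := by
  induction js generalizing F with
  | nil => simp
  | cons j js ih =>
    simp only [List.map_cons, List.foldl_cons]
    rw [step_eq rows F (fun r => r.getD j 0)]
    rw [ih (fun x y => F x y + pvSgn (x.getD j 0) (y.getD j 0))]
    simp only [List.sum_cons]
    congr 1; funext x; congr 1; funext y; ring

-- ===== VERDICT (by name: the statement is the Claim_ definition above) =====
theorem get_majoritar_relation_spec : Claim_equal_get_majoritar_relation := by
  intro rows _ hpre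
  unfold Spec_get_majoritar_relation
  -- A side: reduce to the map-of-maps normal form
  simp only [get_majoritar_relation, sigma_matrix_eq]
  rw [map_range_get_map rows (fun x => rows.map (fun y => pvGetSigma x y)) []
    (fun srow => (PySem.List.pyRange 0 (rows.length : Int) 1).map (fun y =>
      let s := PySem.List.pyGetD srow y []
      if (PySem.List.pyRange 0 (s.length : Int) 1).foldl
          (fun acc i => acc + PySem.List.pyGetD s i 0) 0 > 0 then (1 : Int) else 0))]
  -- B side
  simp only [get_majoritar_relation_alt]
  cases hrows : rows with
  | nil => simp [pvZipStar, pvZipStarGo]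
  | cons r0 t =>
    rw [← hrows]
    have hne : rows ≠ [] := by rw [hrows]; simp
    set m := (rows.headD []).length with hm
    have hlen : ∀ r ∈ rows, r.length = m := hpre
    rw [zipStar_eq m rows hne hlen]
    have hrepl : (List.replicate rows.length (List.replicate rows.length (0 : Int)))
        = rows.map (fun _ => rows.map (fun _ => (0 : Int))) := by
      apply List.ext_getElem <;> simp
    rw [hrepl, fold_cols rows (List.range m) (fun _ _ => 0)]
    rw [List.map_map]
    apply List.map_congr_left
    intro x hx
    rw [map_range_get_map rows (fun y => pvGetSigma x y) []
      (fun s => if (PySem.List.pyRange 0 (s.length : Int) 1).foldl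
          (fun acc i => acc + PySem.List.pyGetD s i 0) 0 > 0 then (1 : Int) else 0)]
    simp only [Function.comp, List.map_map]
    apply List.map_congr_left
    intro y hy
    rw [sum_fold_eq, sigma_sum_eq x y m (hlen x hx) (hlen y hy)]
    simp
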